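-- pv_equiv track=rewrite | github.com/pybursa/homeworks | HOMETASKS/hw3/hw3_solution3.py | simple_reverse_1
-- ===== SOURCE A (Python) =====
-- def simple_reverse_1(text):
--     sentenses = text.split(".")
--     sentenses.reverse()
--     worded_sentenses = []
--     for sentense in sentenses:
--         words = sentense.split()
--         words.reverse()
--         worded_sentenses.append(words)
--     result = []
--     for sentense in worded_sentenses:
--         for word in sentense:
--             result.append(word[::-1])
--     result = " ".join(result)
--     return result
-- ===== SOURCE B (Python) =====
-- def simple_reverse_1(text):
--     words = [w for sentence in text.split(".") for w in sentence.split()]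
--     return " ".join(w[::-1] for w in reversed(words))
-- ===== Notes on version B (the rewrite author's own statement) =====
-- stated objective: simpler
-- what changed: B builds one flat word list in source order and then performs a single global reversal, instead of A's three-stage pipeline (reverse sentence list, reverse each sentence's word list, nested loops over a list-of-lists); reversing sentence order and word order per sentence equals one global reverse of the flattened list.
import Mathlib
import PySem

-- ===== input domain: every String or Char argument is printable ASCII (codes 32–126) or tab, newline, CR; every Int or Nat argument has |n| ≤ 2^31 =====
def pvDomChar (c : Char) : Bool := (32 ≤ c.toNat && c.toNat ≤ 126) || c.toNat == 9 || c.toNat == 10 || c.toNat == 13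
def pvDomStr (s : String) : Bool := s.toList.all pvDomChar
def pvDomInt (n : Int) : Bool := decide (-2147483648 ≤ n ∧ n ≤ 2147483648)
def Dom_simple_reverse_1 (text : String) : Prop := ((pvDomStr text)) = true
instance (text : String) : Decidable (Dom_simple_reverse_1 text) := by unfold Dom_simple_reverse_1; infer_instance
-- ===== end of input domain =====

-- B replaces A's three-stage pipeline (reverse sentences, reverse words per sentence,
-- nested loops over a list-of-lists) by one flat word list and a single global reversal: simpler.

-- ===== PORT A =====
def simple_reverse_1 (text : String) : String :=
  let sentenses := (PySem.Str.split? text ".").getD []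
  let sentenses := sentenses.reverse
  let worded_sentenses : List (List String) := sentenses.foldl (fun acc sentense =>
      let words := PySem.Str.split₀ sentense
      let words := words.reverse
      acc ++ [words]) []
  let result : List String := worded_sentenses.foldl (fun acc sentense =>
      sentense.foldl (fun acc word =>
        acc ++ [(PySem.Str.slice? word none none (-1)).getD ""]) acc) []
  PySem.Str.join " " result

-- ===== PORT B =====
def simple_reverse_1_alt (text : String) : String :=
  let words := ((PySem.Str.split? text ".").getD []).flatMap (fun sentence => PySem.Str.split₀ sentence)
  PySem.Str.join " " (words.reverse.map (fun w => (PySem.Str.slice? w none none (-1)).getD ""))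

-- ===== PRECONDITION & SPEC =====
def Spec_simple_reverse_1 (text : String) (out : String) : Prop := out = simple_reverse_1_alt text
instance (text : String) (out : String) : Decidable (Spec_simple_reverse_1 text out) := by unfold Spec_simple_reverse_1; infer_instance

-- ===== CLAIM (what is proved, stated in full; the proofs are below) =====
def Claim_equal_simple_reverse_1 : Prop := ∀ (text : String), Dom_simple_reverse_1 text → Spec_simple_reverse_1 text (simple_reverse_1 text)

-- ===== LEMMAS AND PROOFS =====

-- A's append-one-at-a-time loops, as map / map-append
theorem pv_foldl_append_map {α β : Type} (f : α → β) (l : List α) (acc : List β) :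
    l.foldl (fun a x => a ++ [f x]) acc = acc ++ l.map f := by
  induction l generalizing acc with
  | nil => simp
  | cons x xs ih => simp [List.foldl, ih]

-- flattening a reversed list of reversed word groups = reversing the flat word list
theorem pv_rev_flatten {α β γ : Type} (g : α → List β) (r : β → γ) (L : List α) :
    ((L.map (fun s => (((g s).map r)).reverse)).reverse).flatten
      = (((L.flatMap g).map r)).reverse := by
  induction L with
  | nil => simp
  | cons x xs ih => simp [ih]

-- ===== VERDICT (by name: the statement is the Claim_ definition above) =====
theorem simple_reverse_1_spec : Claim_equal_simple_reverse_1 := by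
  intro text _
  unfold Spec_simple_reverse_1 simple_reverse_1 simple_reverse_1_alt
  simp only [pv_foldl_append_map, List.nil_append]
  congr 1
  simpa [Function.comp_def] using
    pv_rev_flatten (fun s => PySem.Str.split₀ s)
      (fun w => (PySem.Str.slice? w none none (-1)).getD "")
      ((PySem.Str.split? text ".").getD [])
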